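-- pv_equiv track=rewrite | github.com/mollymillions-code/uae-healthcare-directory | scripts/translate-arabic-11000-12519.py | detect_facility_type_ar
-- ===== SOURCE A (Python) =====
-- FACILITY_TYPE_AR = {
--     "medical centre": "مركز طبي",
--     "medical center": "مركز طبي",
--     "clinic": "عيادة",
--     "hospital": "مستشفى",
--     "pharmacy": "صيدلية",
--     "outpatient pharmacy": "صيدلية للمرضى الخارجيين",
--     "drug store": "صيدلية ومستودع أدوية",
--     "rehabilitation centre": "مركز إعادة التأهيل",
--     "rehabilitation center": "مركز إعادة التأهيل",
--     "optical centre": "مركز بصريات",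
--     "optical center": "مركز بصريات",
--     "dental clinic": "عيادة أسنان",
--     "dental centre": "مركز أسنان",
--     "dental center": "مركز أسنان",
--     "mobile dental unit": "وحدة أسنان متنقلة",
--     "mobile clinic": "عيادة متنقلة",
--     "school clinic": "عيادة مدرسية",
--     "specialist clinic": "عيادة متخصصة",
--     "specialist centre": "مركز متخصص",
--     "specialist center": "مركز متخصص",
--     "polyclinic": "مجمع عيادات",
--     "health centre": "مركز صحي",
--     "health center": "مركز صحي",
--     "day surgery centre": "مركز الجراحة اليومية",
--     "day surgery center": "مركز الجراحة اليومية",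
--     "diagnostic centre": "مركز تشخيصي",
--     "diagnostic center": "مركز تشخيصي",
--     "imaging centre": "مركز تصوير طبي",
--     "imaging center": "مركز تصوير طبي",
--     "laboratory": "مختبر طبي",
--     "medical laboratory": "مختبر طبي",
--     "physiotherapy centre": "مركز علاج طبيعي",
--     "physiotherapy center": "مركز علاج طبيعي",
--     "wellness centre": "مركز العافية",
--     "wellness center": "مركز العافية",
--     "beauty centre": "مركز تجميل",
--     "beauty center": "مركز تجميل",
--     "cosmetic centre": "مركز تجميلي",
--     "cosmetic center": "مركز تجميلي",
--     "fertility centre": "مركز الخصوبة",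
--     "fertility center": "مركز الخصوبة",
--     "maternity hospital": "مستشفى الولادة",
--     "eye centre": "مركز طب العيون",
--     "eye center": "مركز طب العيون",
--     "mental health centre": "مركز الصحة النفسية",
--     "mental health center": "مركز الصحة النفسية",
--     "radiology centre": "مركز الأشعة",
--     "radiology center": "مركز الأشعة",
--     "blood bank": "بنك الدم",
--     "home care": "رعاية منزلية",
--     "home health": "رعاية صحية منزلية",
--     "veterinary clinic": "عيادة بيطرية",
--     "teeth manufacturing lab": "مختبر تصنيع الأسنان",
--     "dental lab": "مختبر أسنان",
-- }
--
-- def detect_facility_type_ar(description, facility_type_raw):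
--     """Extract the Arabic facility type label from the English description opening."""
--     desc_lower = description.lower() if description else ""
--
--     # Try longest match first
--     sorted_keys = sorted(FACILITY_TYPE_AR.keys(), key=len, reverse=True)
--     for key in sorted_keys:
--         if f" is a {key}" in desc_lower or f" is an {key}" in desc_lower:
--             return FACILITY_TYPE_AR[key]
--
--     # Fallback to facilityType field
--     if facility_type_raw:
--         ft_lower = facility_type_raw.lower()
--         for key in sorted_keys:
--             if key in ft_lower:
--                 return FACILITY_TYPE_AR[key]
--
--     return "منشأة طبية"
-- ===== SOURCE B (Python) =====
-- FACILITY_TYPE_AR = {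
--     "medical centre": "مركز طبي",
--     "medical center": "مركز طبي",
--     "clinic": "عيادة",
--     "hospital": "مستشفى",
--     "pharmacy": "صيدلية",
--     "outpatient pharmacy": "صيدلية للمرضى الخارجيين",
--     "drug store": "صيدلية ومستودع أدوية",
--     "rehabilitation centre": "مركز إعادة التأهيل",
--     "rehabilitation center": "مركز إعادة التأهيل",
--     "optical centre": "مركز بصريات",
--     "optical center": "مركز بصريات",
--     "dental clinic": "عيادة أسنان",
--     "dental centre": "مركز أسنان",
--     "dental center": "مركز أسنان",
--     "mobile dental unit": "وحدة أسنان متنقلة",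
--     "mobile clinic": "عيادة متنقلة",
--     "school clinic": "عيادة مدرسية",
--     "specialist clinic": "عيادة متخصصة",
--     "specialist centre": "مركز متخصص",
--     "specialist center": "مركز متخصص",
--     "polyclinic": "مجمع عيادات",
--     "health centre": "مركز صحي",
--     "health center": "مركز صحي",
--     "day surgery centre": "مركز الجراحة اليومية",
--     "day surgery center": "مركز الجراحة اليومية",
--     "diagnostic centre": "مركز تشخيصي",
--     "diagnostic center": "مركز تشخيصي",
--     "imaging centre": "مركز تصوير طبي",
--     "imaging center": "مركز تصوير طبي",
--     "laboratory": "مختبر طبي",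
--     "medical laboratory": "مختبر طبي",
--     "physiotherapy centre": "مركز علاج طبيعي",
--     "physiotherapy center": "مركز علاج طبيعي",
--     "wellness centre": "مركز العافية",
--     "wellness center": "مركز العافية",
--     "beauty centre": "مركز تجميل",
--     "beauty center": "مركز تجميل",
--     "cosmetic centre": "مركز تجميلي",
--     "cosmetic center": "مركز تجميلي",
--     "fertility centre": "مركز الخصوبة",
--     "fertility center": "مركز الخصوبة",
--     "maternity hospital": "مستشفى الولادة",
--     "eye centre": "مركز طب العيون",
--     "eye center": "مركز طب العيون",
--     "mental health centre": "مركز الصحة النفسية",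
--     "mental health center": "مركز الصحة النفسية",
--     "radiology centre": "مركز الأشعة",
--     "radiology center": "مركز الأشعة",
--     "blood bank": "بنك الدم",
--     "home care": "رعاية منزلية",
--     "home health": "رعاية صحية منزلية",
--     "veterinary clinic": "عيادة بيطرية",
--     "teeth manufacturing lab": "مختبر تصنيع الأسنان",
--     "dental lab": "مختبر أسنان",
-- }
--
--
-- def detect_facility_type_ar(description, facility_type_raw):
--     """Extract the Arabic facility type label from the English description opening."""
--     desc_lower = description.lower() if description else ""
--
--     # Single pass, no sorting: keep the longest matching key (ties -> first inserted),
--     # which is exactly what scanning the length-sorted (stable) key list finds first.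
--     best = None
--     for key in FACILITY_TYPE_AR:
--         if (f" is a {key}" in desc_lower or f" is an {key}" in desc_lower) and (
--             best is None or len(key) > len(best)
--         ):
--             best = key
--
--     if best is None and facility_type_raw:
--         ft_lower = facility_type_raw.lower()
--         for key in FACILITY_TYPE_AR:
--             if key in ft_lower and (best is None or len(key) > len(best)):
--                 best = key
--
--     return FACILITY_TYPE_AR[best] if best is not None else "منشأة طبية"
-- ===== Notes on version B (the rewrite author's own statement) =====
-- stated objective: simpler
-- what changed: Replaced the per-call sort of the key list followed by first-match with a single unsorted pass that keeps the longest matching key via a strict-> argmax (ties keep the earliest-inserted key, matching the stable sort's order).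
import Mathlib
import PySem

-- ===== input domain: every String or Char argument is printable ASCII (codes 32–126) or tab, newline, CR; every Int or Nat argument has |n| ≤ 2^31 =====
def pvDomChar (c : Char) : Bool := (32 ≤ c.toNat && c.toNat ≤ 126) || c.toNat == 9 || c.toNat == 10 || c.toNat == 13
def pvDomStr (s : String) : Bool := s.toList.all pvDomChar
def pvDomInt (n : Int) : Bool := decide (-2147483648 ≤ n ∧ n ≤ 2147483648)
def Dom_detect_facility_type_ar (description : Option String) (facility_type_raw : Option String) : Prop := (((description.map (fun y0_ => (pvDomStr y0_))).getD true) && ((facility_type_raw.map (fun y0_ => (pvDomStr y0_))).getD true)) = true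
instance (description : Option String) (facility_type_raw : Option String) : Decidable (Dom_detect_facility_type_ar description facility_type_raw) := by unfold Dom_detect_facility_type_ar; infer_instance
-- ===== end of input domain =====

-- B replaces A's per-call stable sort + first-match by a single unsorted strict-> argmax pass (same result; return value only, no side effects).

-- the module constant FACILITY_TYPE_AR (shared context of both programs)
def FACILITY_TYPE_AR : PySem.Dict String String := PySem.Dict.ofList [
  ("medical centre", "مركز طبي"), ("medical center", "مركز طبي"), ("clinic", "عيادة"),
  ("hospital", "مستشفى"), ("pharmacy", "صيدلية"), ("outpatient pharmacy", "صيدلية للمرضى الخارجيين"),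
  ("drug store", "صيدلية ومستودع أدوية"), ("rehabilitation centre", "مركز إعادة التأهيل"),
  ("rehabilitation center", "مركز إعادة التأهيل"), ("optical centre", "مركز بصريات"),
  ("optical center", "مركز بصريات"), ("dental clinic", "عيادة أسنان"), ("dental centre", "مركز أسنان"),
  ("dental center", "مركز أسنان"), ("mobile dental unit", "وحدة أسنان متنقلة"), ("mobile clinic", "عيادة متنقلة"),
  ("school clinic", "عيادة مدرسية"), ("specialist clinic", "عيادة متخصصة"), ("specialist centre", "مركز متخصص"),
  ("specialist center", "مركز متخصص"), ("polyclinic", "مجمع عيادات"), ("health centre", "مركز صحي"),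
  ("health center", "مركز صحي"), ("day surgery centre", "مركز الجراحة اليومية"),
  ("day surgery center", "مركز الجراحة اليومية"), ("diagnostic centre", "مركز تشخيصي"),
  ("diagnostic center", "مركز تشخيصي"), ("imaging centre", "مركز تصوير طبي"), ("imaging center", "مركز تصوير طبي"),
  ("laboratory", "مختبر طبي"), ("medical laboratory", "مختبر طبي"), ("physiotherapy centre", "مركز علاج طبيعي"),
  ("physiotherapy center", "مركز علاج طبيعي"), ("wellness centre", "مركز العافية"),
  ("wellness center", "مركز العافية"), ("beauty centre", "مركز تجميل"), ("beauty center", "مركز تجميل"),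
  ("cosmetic centre", "مركز تجميلي"), ("cosmetic center", "مركز تجميلي"), ("fertility centre", "مركز الخصوبة"),
  ("fertility center", "مركز الخصوبة"), ("maternity hospital", "مستشفى الولادة"), ("eye centre", "مركز طب العيون"),
  ("eye center", "مركز طب العيون"), ("mental health centre", "مركز الصحة النفسية"),
  ("mental health center", "مركز الصحة النفسية"), ("radiology centre", "مركز الأشعة"),
  ("radiology center", "مركز الأشعة"), ("blood bank", "بنك الدم"), ("home care", "رعاية منزلية"),
  ("home health", "رعاية صحية منزلية"), ("veterinary clinic", "عيادة بيطرية"),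
  ("teeth manufacturing lab", "مختبر تصنيع الأسنان"), ("dental lab", "مختبر أسنان")]

-- ===== PORT A =====
-- 'for key in sorted_keys: if <cond key>: return FACILITY_TYPE_AR[key]'
-- (FACILITY_TYPE_AR[key] never raises here: key comes from the dict's own keys, so getD's default "" is unreachable)
def fta_first (p : String → Bool) : List String → Option String
  | [] => none
  | k :: rest => if p k then some (PySem.Dict.getD FACILITY_TYPE_AR k "") else fta_first p rest

def detect_facility_type_ar (description : Option String) (facility_type_raw : Option String) : String :=
  let desc_lower := match description with
    | some s => if s ≠ "" then PySem.Str.lower s else ""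
    | none => ""
  let sorted_keys := PySem.List.sorted (PySem.Dict.keys FACILITY_TYPE_AR) (fun k => PySem.Str.len k) true
  match fta_first (fun key => PySem.Str.isIn (" is a " ++ key) desc_lower ||
                              PySem.Str.isIn (" is an " ++ key) desc_lower) sorted_keys with
  | some v => v
  | none =>
    match facility_type_raw with
    | some ft =>
        if ft ≠ "" then
          match fta_first (fun key => PySem.Str.isIn key (PySem.Str.lower ft)) sorted_keys with
          | some v => v
          | none => "منشأة طبية"
        else "منشأة طبية"
    | none => "منشأة طبية"

-- ===== PORT B =====
-- 'best = None; for key in FACILITY_TYPE_AR: if <cond key> and (best is None or len(key) > len(best)): best = key'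
def fta_best (p : String → Bool) (keys : List String) : Option String :=
  keys.foldl (fun best k =>
    if p k && (match best with
               | none => true
               | some b => decide (PySem.Str.len b < PySem.Str.len k))
    then some k else best) none

def detect_facility_type_ar_alt (description : Option String) (facility_type_raw : Option String) : String :=
  let desc_lower := match description with
    | some s => if s ≠ "" then PySem.Str.lower s else ""
    | none => ""
  let best1 := fta_best (fun key => PySem.Str.isIn (" is a " ++ key) desc_lower ||
                                    PySem.Str.isIn (" is an " ++ key) desc_lower)
                        (PySem.Dict.keys FACILITY_TYPE_AR)
  let best2 := match best1, facility_type_raw with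
    | none, some ft =>
        if ft ≠ "" then
          fta_best (fun key => PySem.Str.isIn key (PySem.Str.lower ft)) (PySem.Dict.keys FACILITY_TYPE_AR)
        else none
    | b, _ => b
  match best2 with
  | some k => PySem.Dict.getD FACILITY_TYPE_AR k ""
  | none => "منشأة طبية"

-- ===== PRECONDITION & SPEC =====
def Spec_detect_facility_type_ar (description : Option String) (facility_type_raw : Option String) (out : String) : Prop := out = detect_facility_type_ar_alt description facility_type_raw
instance (description : Option String) (facility_type_raw : Option String) (out : String) : Decidable (Spec_detect_facility_type_ar description facility_type_raw out) := by unfold Spec_detect_facility_type_ar; infer_instance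

-- ===== CLAIM (what is proved, stated in full; the proofs are below) =====
def Claim_equal_detect_facility_type_ar : Prop := ∀ (description : Option String) (facility_type_raw : Option String), Dom_detect_facility_type_ar description facility_type_raw → Spec_detect_facility_type_ar description facility_type_raw (detect_facility_type_ar description facility_type_raw)

-- ===== LEMMAS AND PROOFS =====

-- stable descending-by-length insertion sort (proof vehicle; evaluates to A's sorted list on the concrete keys)
def pvIns (x : String) : List String → List String
  | [] => [x]
  | b :: t => if PySem.Str.len x < PySem.Str.len b then b :: pvIns x t else x :: b :: t

def pvIsort : List String → List String
  | [] => []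
  | x :: xs => pvIns x (pvIsort xs)

-- first match of the recursion 'longest wins, head wins ties'
def pvBestR (p : String → Bool) : List String → Option String
  | [] => none
  | x :: xs =>
    match pvBestR p xs with
    | none => if p x then some x else none
    | some m => if p x && decide (PySem.Str.len m ≤ PySem.Str.len x) then some x else some m

def pvMerge (acc r : Option String) : Option String :=
  match r with
  | none => acc
  | some m => match acc with
    | none => some m
    | some a => if PySem.Str.len a < PySem.Str.len m then some m else acc

theorem mem_pvIns {y x : String} {s : List String} :
    y ∈ pvIns x s ↔ y = x ∨ y ∈ s := by
  induction s with
  | nil => simp [pvIns]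
  | cons b t ih =>
    by_cases h : PySem.Str.len x < PySem.Str.len b
    · rw [pvIns, if_pos h]
      simp only [List.mem_cons, ih]
      tauto
    · rw [pvIns, if_neg h]
      simp [List.mem_cons]

theorem pvIns_pairwise (x : String) (s : List String)
    (hs : s.Pairwise (fun a b => PySem.Str.len b ≤ PySem.Str.len a)) :
    (pvIns x s).Pairwise (fun a b => PySem.Str.len b ≤ PySem.Str.len a) := by
  induction s with
  | nil => simp [pvIns]
  | cons b t ih =>
    rcases List.pairwise_cons.mp hs with ⟨hb, ht⟩
    by_cases h : PySem.Str.len x < PySem.Str.len b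
    · rw [pvIns, if_pos h]
      refine List.pairwise_cons.mpr ⟨?_, ih ht⟩
      intro y hy
      rcases mem_pvIns.mp hy with rfl | hy'
      · omega
      · exact hb y hy'
    · rw [pvIns, if_neg h]
      refine List.pairwise_cons.mpr ⟨?_, hs⟩
      intro y hy
      rcases List.mem_cons.mp hy with rfl | hy'
      · omega
      · have := hb y hy'; omega

theorem pvIsort_pairwise (l : List String) :
    (pvIsort l).Pairwise (fun a b => PySem.Str.len b ≤ PySem.Str.len a) := by
  induction l with
  | nil => simp [pvIsort]
  | cons x xs ih => exact pvIns_pairwise x _ ih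

theorem find?_pvIns (p : String → Bool) (x : String) (s : List String)
    (hs : s.Pairwise (fun a b => PySem.Str.len b ≤ PySem.Str.len a)) :
    List.find? p (pvIns x s) =
      (match List.find? p s with
       | none => if p x then some x else none
       | some m => if p x && decide (PySem.Str.len m ≤ PySem.Str.len x) then some x else some m) := by
  induction s with
  | nil => cases hpx : p x <;> simp [pvIns, List.find?, hpx]
  | cons b t ih =>
    rcases List.pairwise_cons.mp hs with ⟨hb, ht⟩
    by_cases h : PySem.Str.len x < PySem.Str.len b
    · rw [pvIns, if_pos h]
      cases hpb : p b
      · rw [List.find?_cons_of_neg (by simp [hpb]), List.find?_cons_of_neg (by simp [hpb]), ih ht]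
      · rw [List.find?_cons_of_pos hpb, List.find?_cons_of_pos hpb]
        cases hpx : p x
        · simp
        · simp only [Bool.true_and]
          rw [if_neg (by simp only [decide_eq_true_eq]; omega)]
    · rw [pvIns, if_neg h]
      cases hpx : p x
      · rw [List.find?_cons_of_neg (by simp [hpx])]
        cases hm : List.find? p (b :: t) <;> simp
      · rw [List.find?_cons_of_pos hpx]
        cases hm : List.find? p (b :: t) with
        | none => simp
        | some m =>
          have hmem : m ∈ b :: t := List.mem_of_find?_eq_some hm
          have hlen : PySem.Str.len m ≤ PySem.Str.len b := by
            rcases List.mem_cons.mp hmem with rfl | hmt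
            · omega
            · exact hb m hmt
          simp only [Bool.true_and]
          rw [if_pos (by simp only [decide_eq_true_eq]; omega)]

theorem find?_pvIsort (p : String → Bool) (l : List String) :
    List.find? p (pvIsort l) = pvBestR p l := by
  induction l with
  | nil => rfl
  | cons x xs ih =>
    rw [pvIsort, pvBestR, ← ih]
    exact find?_pvIns p x _ (pvIsort_pairwise xs)

theorem foldl_fta_best (p : String → Bool) (l : List String) :
    ∀ acc : Option String,
      l.foldl (fun best k =>
        if p k && (match best with
                   | none => true
                   | some b => decide (PySem.Str.len b < PySem.Str.len k))
        then some k else best) acc = pvMerge acc (pvBestR p l) := by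
  induction l with
  | nil => intro acc; rfl
  | cons x xs ih =>
    intro acc
    rw [List.foldl_cons, ih]
    cases hpx : p x
    · have hstep : (if (false && (match acc with
                   | none => true
                   | some b => decide (PySem.Str.len b < PySem.Str.len x))) = true
        then some x else acc) = acc := by simp
      rw [hstep]
      cases hr : pvBestR p xs with
      | none =>
        have hbx : pvBestR p (x :: xs) = none := by simp [pvBestR, hr, hpx]
        rw [hbx]
      | some m =>
        have hbx : pvBestR p (x :: xs) = some m := by simp [pvBestR, hr, hpx]
        rw [hbx]
    · cases acc with
      | none =>
        have hstep : (if (true && (match (none : Option String) with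
                   | none => true
                   | some b => decide (PySem.Str.len b < PySem.Str.len x))) = true
            then some x else (none : Option String)) = some x := by simp
        rw [hstep]
        cases hr : pvBestR p xs with
        | none =>
          have hbx : pvBestR p (x :: xs) = some x := by simp [pvBestR, hr, hpx]
          rw [hbx]; rfl
        | some m =>
          have hbx : pvBestR p (x :: xs) =
              (if decide (PySem.Str.len m ≤ PySem.Str.len x) = true then some x else some m) := by
            simp only [pvBestR, hr, hpx, Bool.true_and]
          rw [hbx]
          by_cases hmx : PySem.Str.len m ≤ PySem.Str.len x
          · rw [if_pos (by simp only [decide_eq_true_eq]; omega)]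
            simp only [pvMerge]
            rw [if_neg (by omega)]
          · rw [if_neg (by simp only [decide_eq_true_eq]; omega)]
            simp only [pvMerge]
            rw [if_pos (by omega)]
      | some a =>
        by_cases hax : PySem.Str.len a < PySem.Str.len x
        · have hstep : (if (true && (match (some a : Option String) with
                     | none => true
                     | some b => decide (PySem.Str.len b < PySem.Str.len x))) = true
              then some x else (some a : Option String)) = some x := by
            simp only [Bool.true_and, decide_eq_true_eq]
            rw [if_pos hax]
          rw [hstep]
          cases hr : pvBestR p xs with
          | none =>
            have hbx : pvBestR p (x :: xs) = some x := by simp [pvBestR, hr, hpx]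
            rw [hbx]
            simp only [pvMerge]
            rw [if_pos hax]
          | some m =>
            have hbx : pvBestR p (x :: xs) =
                (if decide (PySem.Str.len m ≤ PySem.Str.len x) = true then some x else some m) := by
              simp only [pvBestR, hr, hpx, Bool.true_and]
            rw [hbx]
            by_cases hmx : PySem.Str.len m ≤ PySem.Str.len x
            · rw [if_pos (by simp only [decide_eq_true_eq]; omega)]
              simp only [pvMerge]
              rw [if_neg (by omega), if_pos hax]
            · rw [if_neg (by simp only [decide_eq_true_eq]; omega)]
              simp only [pvMerge]
              rw [if_pos (by omega), if_pos (by omega)]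
        · have hstep : (if (true && (match (some a : Option String) with
                     | none => true
                     | some b => decide (PySem.Str.len b < PySem.Str.len x))) = true
              then some x else (some a : Option String)) = some a := by
            simp only [Bool.true_and, decide_eq_true_eq]
            rw [if_neg hax]
          rw [hstep]
          cases hr : pvBestR p xs with
          | none =>
            have hbx : pvBestR p (x :: xs) = some x := by simp [pvBestR, hr, hpx]
            rw [hbx]
            simp only [pvMerge]
            rw [if_neg hax]
          | some m =>
            have hbx : pvBestR p (x :: xs) =
                (if decide (PySem.Str.len m ≤ PySem.Str.len x) = true then some x else some m) := by
              simp only [pvBestR, hr, hpx, Bool.true_and]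
            rw [hbx]
            by_cases hmx : PySem.Str.len m ≤ PySem.Str.len x
            · rw [if_pos (by simp only [decide_eq_true_eq]; omega)]
              simp only [pvMerge]
              rw [if_neg hax, if_neg (by omega)]
            · rw [if_neg (by simp only [decide_eq_true_eq]; omega)]

theorem fta_best_eq (p : String → Bool) (l : List String) :
    fta_best p l = pvBestR p l := by
  rw [fta_best, foldl_fta_best]
  cases pvBestR p l <;> simp [pvMerge]

theorem fta_first_eq_find? (p : String → Bool) (l : List String) :
    fta_first p l = (List.find? p l).map (fun k => PySem.Dict.getD FACILITY_TYPE_AR k "") := by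
  induction l with
  | nil => simp [fta_first, List.find?]
  | cons k rest ih =>
    cases hpk : p k
    · rw [fta_first, if_neg (by simp [hpk]), List.find?_cons_of_neg (by simp [hpk]), ih]
    · rw [fta_first, if_pos hpk, List.find?_cons_of_pos hpk, Option.map_some]

-- A's concrete sorted key list IS the stable descending insertion sort of the insertion-order keys
theorem sorted_keys_eq :
    PySem.List.sorted (PySem.Dict.keys FACILITY_TYPE_AR) (fun k => PySem.Str.len k) true
      = pvIsort (PySem.Dict.keys FACILITY_TYPE_AR) := by
  set_option maxRecDepth 40000 in decide

theorem fta_first_sorted_eq (p : String → Bool) :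
    fta_first p (PySem.List.sorted (PySem.Dict.keys FACILITY_TYPE_AR) (fun k => PySem.Str.len k) true)
      = (fta_best p (PySem.Dict.keys FACILITY_TYPE_AR)).map
          (fun k => PySem.Dict.getD FACILITY_TYPE_AR k "") := by
  rw [sorted_keys_eq, fta_first_eq_find?, find?_pvIsort, fta_best_eq]

-- how the two bodies assemble, for any phase-1 test p and ft-dependent phase-2 test q
theorem fta_assemble (p : String → Bool) (q : String → String → Bool) (ftr : Option String) :
    (match fta_first p (PySem.List.sorted (PySem.Dict.keys FACILITY_TYPE_AR) (fun k => PySem.Str.len k) true) with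
     | some v => v
     | none =>
       match ftr with
       | some ft =>
           if ft ≠ "" then
             match fta_first (q ft) (PySem.List.sorted (PySem.Dict.keys FACILITY_TYPE_AR) (fun k => PySem.Str.len k) true) with
             | some v => v
             | none => "منشأة طبية"
           else "منشأة طبية"
       | none => "منشأة طبية")
    =
    (match (match fta_best p (PySem.Dict.keys FACILITY_TYPE_AR), ftr with
            | none, some ft => if ft ≠ "" then fta_best (q ft) (PySem.Dict.keys FACILITY_TYPE_AR) else none
            | b, _ => b) with
     | some k => PySem.Dict.getD FACILITY_TYPE_AR k ""
     | none => "منشأة طبية") := by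
  rw [fta_first_sorted_eq p]
  cases ftr with
  | none => cases h1 : fta_best p (PySem.Dict.keys FACILITY_TYPE_AR) <;> rfl
  | some ft =>
    cases h1 : fta_best p (PySem.Dict.keys FACILITY_TYPE_AR) with
    | some k => rfl
    | none =>
      simp only [Option.map_none]
      by_cases hft : ft ≠ ""
      · rw [if_pos hft, if_pos hft, fta_first_sorted_eq (q ft)]
        cases fta_best (q ft) (PySem.Dict.keys FACILITY_TYPE_AR) <;> rfl
      · rw [if_neg hft, if_neg hft]

-- ===== VERDICT (by name: the statement is the Claim_ definition above) =====
set_option maxRecDepth 40000 in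
theorem detect_facility_type_ar_spec : Claim_equal_detect_facility_type_ar := by
  intro description facility_type_raw hdom
  clear hdom
  unfold Spec_detect_facility_type_ar detect_facility_type_ar detect_facility_type_ar_alt
  exact fta_assemble
    (fun key => PySem.Str.isIn (" is a " ++ key) (match description with
        | some s => if s ≠ "" then PySem.Str.lower s else ""
        | none => "") ||
      PySem.Str.isIn (" is an " ++ key) (match description with
        | some s => if s ≠ "" then PySem.Str.lower s else ""
        | none => ""))
    (fun ft key => PySem.Str.isIn key (PySem.Str.lower ft))
    facility_type_raw
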